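-- pv_equiv track=rewrite | github.com/Ammoniya/research | generate_signatures.py | _assess_severity
-- ===== SOURCE A (Python) =====
-- from typing import Dict, List, Optional, Tuple
--
-- def _assess_severity(patterns: List[str], vuln_type: str) -> List[str]:
--     """Assess severity indicators based on detected patterns"""
--     indicators = []
--
--     # Critical: Missing authentication on sensitive operations
--     if any('AUTH:' in p for p in patterns):
--         if 'CSRF' in vuln_type or 'Missing Authorization' in vuln_type:
--             indicators.append('CRITICAL:MISSING_AUTH')
--
--     # High: Missing input sanitization
--     if any('SANITIZE:' in p for p in patterns):
--         if 'XSS' in vuln_type or 'Injection' in vuln_type: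
--             indicators.append('HIGH:MISSING_SANITIZATION')
--
--     # High: SQL injection protection
--     if any('SQL_SECURITY:' in p for p in patterns):
--         indicators.append('HIGH:SQL_INJECTION_RISK')
--
--     # Critical: File operation security
--     if any('FILE_SECURITY:' in p for p in patterns):
--         if 'Traversal' in vuln_type or 'File' in vuln_type:
--             indicators.append('CRITICAL:UNSAFE_FILE_OPS')
--
--     return indicators
-- ===== SOURCE B (Python) =====
-- RULES = [
--     ('AUTH:', ('CSRF', 'Missing Authorization'), 'CRITICAL:MISSING_AUTH'),
--     ('SANITIZE:', ('XSS', 'Injection'), 'HIGH:MISSING_SANITIZATION'),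
--     ('SQL_SECURITY:', (), 'HIGH:SQL_INJECTION_RISK'),
--     ('FILE_SECURITY:', ('Traversal', 'File'), 'CRITICAL:UNSAFE_FILE_OPS'),
-- ]
--
-- def _assess_severity(patterns, vuln_type):
--     """Assess severity indicators based on detected patterns"""
--     mask = 0
--     for p in patterns:
--         for i, (tag, _, _) in enumerate(RULES):
--             if tag in p:
--                 mask |= 1 << i
--     return [ind for i, (tag, subs, ind) in enumerate(RULES)
--             if (mask >> i) & 1 and (not subs or any(s in vuln_type for s in subs))]
-- ===== Notes on version B (the rewrite author's own statement) =====
-- stated objective: alternative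
-- what changed: B is a data-driven rule engine: the four hard-coded branches become a declarative rule table; one pass over patterns builds an integer bitmask of which rule tags occur, and the result is a comprehension over the enumerated table filtered by bit tests and the rules' vuln-substring lists.
import Mathlib
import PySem

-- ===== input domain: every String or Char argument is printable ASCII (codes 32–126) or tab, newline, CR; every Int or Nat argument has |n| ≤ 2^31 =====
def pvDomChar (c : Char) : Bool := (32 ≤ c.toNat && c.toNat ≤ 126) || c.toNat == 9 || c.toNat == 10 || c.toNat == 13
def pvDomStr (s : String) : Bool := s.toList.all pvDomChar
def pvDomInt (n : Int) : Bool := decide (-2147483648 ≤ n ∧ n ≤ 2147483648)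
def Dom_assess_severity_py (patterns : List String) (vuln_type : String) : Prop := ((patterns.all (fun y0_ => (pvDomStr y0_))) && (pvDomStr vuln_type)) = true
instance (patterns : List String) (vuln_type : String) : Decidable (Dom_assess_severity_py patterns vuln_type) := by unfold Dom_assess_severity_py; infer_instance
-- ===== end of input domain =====

-- B replaces A's four hard-coded any(...) branches by a data-driven rule engine: one pass over
-- patterns builds a bitmask of which rule tags occur, then a filtered comprehension over the
-- enumerated rule table emits the indicators (alternative decomposition, same cost class).

-- ===== PORT A =====
def assess_severity_py (patterns : List String) (vuln_type : String) : List String :=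
  let indicators : List String := []
  let indicators :=
    if patterns.any (fun p => PySem.Str.isIn "AUTH:" p) then
      (if PySem.Str.isIn "CSRF" vuln_type || PySem.Str.isIn "Missing Authorization" vuln_type then
        indicators ++ ["CRITICAL:MISSING_AUTH"] else indicators)
    else indicators
  let indicators :=
    if patterns.any (fun p => PySem.Str.isIn "SANITIZE:" p) then
      (if PySem.Str.isIn "XSS" vuln_type || PySem.Str.isIn "Injection" vuln_type then
        indicators ++ ["HIGH:MISSING_SANITIZATION"] else indicators)
    else indicators
  let indicators :=
    if patterns.any (fun p => PySem.Str.isIn "SQL_SECURITY:" p) then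
      indicators ++ ["HIGH:SQL_INJECTION_RISK"] else indicators
  let indicators :=
    if patterns.any (fun p => PySem.Str.isIn "FILE_SECURITY:" p) then
      (if PySem.Str.isIn "Traversal" vuln_type || PySem.Str.isIn "File" vuln_type then
        indicators ++ ["CRITICAL:UNSAFE_FILE_OPS"] else indicators)
    else indicators
  indicators

-- ===== PORT B =====
-- the RULES table of Source B: (pattern tag, vuln_type substrings (empty = unconditional), indicator)
def pvRules : List (String × List String × String) :=
  [("AUTH:", ["CSRF", "Missing Authorization"], "CRITICAL:MISSING_AUTH"),
   ("SANITIZE:", ["XSS", "Injection"], "HIGH:MISSING_SANITIZATION"),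
   ("SQL_SECURITY:", [], "HIGH:SQL_INJECTION_RISK"),
   ("FILE_SECURITY:", ["Traversal", "File"], "CRITICAL:UNSAFE_FILE_OPS")]

def assess_severity_py_alt (patterns : List String) (vuln_type : String) : List String :=
  let mask : Nat :=
    patterns.foldl (fun m p =>
      (PySem.List.enumerate pvRules).foldl (fun m ir =>
        if PySem.Str.isIn ir.2.1 p then m ||| (1 <<< ir.1.toNat) else m) m) 0
  (PySem.List.enumerate pvRules).filterMap (fun ir =>
    if (((mask >>> ir.1.toNat) &&& 1) != 0) &&
       (ir.2.2.1.isEmpty || ir.2.2.1.any (fun s => PySem.Str.isIn s vuln_type))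
    then some ir.2.2.2 else none)

-- ===== PRECONDITION & SPEC =====
def Spec_assess_severity_py (patterns : List String) (vuln_type : String) (out : List String) : Prop := out = assess_severity_py_alt patterns vuln_type
instance (patterns : List String) (vuln_type : String) (out : List String) : Decidable (Spec_assess_severity_py patterns vuln_type out) := by unfold Spec_assess_severity_py; infer_instance

-- ===== CLAIM (what is proved, stated in full; the proofs are below) =====
def Claim_equal_assess_severity_py : Prop := ∀ (patterns : List String) (vuln_type : String), Dom_assess_severity_py patterns vuln_type → Spec_assess_severity_py patterns vuln_type (assess_severity_py patterns vuln_type)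

-- ===== LEMMAS AND PROOFS =====

-- '(mask >> i) & 1' is truthy exactly when bit i of the mask is set
theorem pv_bit (m i : Nat) : ((((m >>> i) &&& 1) != 0)) = m.testBit i := by
  simp [Nat.testBit, Nat.and_comm]

-- one pattern's pass over the enumerated rule table, read back one bit at a time
theorem pv_step_bit (m : Nat) (p : String) (i : Nat) (hi : i < 4) :
    ((PySem.List.enumerate pvRules).foldl (fun m ir =>
        if PySem.Str.isIn ir.2.1 p then m ||| (1 <<< ir.1.toNat) else m) m).testBit i
    = (m.testBit i ||
       PySem.Str.isIn ((pvRules[i]'(by simpa [pvRules] using hi)).1) p) := by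
  interval_cases i <;>
    simp only [pvRules, PySem.List.enumerate, List.foldl] <;>
    split_ifs <;>
    simp_all [Nat.testBit_or, PySem.Str.isIn, show Nat.testBit 1 1 = false from by decide, show Nat.testBit 1 2 = false from by decide, show Nat.testBit 1 3 = false from by decide, show Nat.testBit 2 1 = true from by decide, show Nat.testBit 2 2 = false from by decide, show Nat.testBit 2 3 = false from by decide, show Nat.testBit 4 1 = false from by decide, show Nat.testBit 4 2 = true from by decide, show Nat.testBit 4 3 = false from by decide, show Nat.testBit 8 1 = false from by decide, show Nat.testBit 8 2 = false from by decide, show Nat.testBit 8 3 = true from by decide]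

-- the whole mask fold: bit i records whether some pattern contains rule i's tag
theorem pv_mask_bit (patterns : List String) (m : Nat) (i : Nat) (hi : i < 4) :
    (patterns.foldl (fun m p =>
        (PySem.List.enumerate pvRules).foldl (fun m ir =>
          if PySem.Str.isIn ir.2.1 p then m ||| (1 <<< ir.1.toNat) else m) m) m).testBit i
    = (m.testBit i ||
       patterns.any (fun p => PySem.Str.isIn ((pvRules[i]'(by simpa [pvRules] using hi)).1) p)) := by
  induction patterns generalizing m with
  | nil => simp
  | cons p rest ih =>
    simp only [List.foldl_cons, List.any_cons, ih, pv_step_bit m p i hi, Bool.or_assoc]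

theorem assess_severity_py_eq (patterns : List String) (vuln_type : String) :
    assess_severity_py patterns vuln_type = assess_severity_py_alt patterns vuln_type := by
  unfold assess_severity_py assess_severity_py_alt
  have h0 := pv_mask_bit patterns 0 0 (by omega)
  have h1 := pv_mask_bit patterns 0 1 (by omega)
  have h2 := pv_mask_bit patterns 0 2 (by omega)
  have h3 := pv_mask_bit patterns 0 3 (by omega)
  simp only [PySem.List.enumerate, pvRules, List.getElem_cons_zero, List.getElem_cons_succ,
    Nat.zero_testBit, Bool.false_or] at h0 h1 h2 h3
  simp only [PySem.List.enumerate, pvRules, List.filterMap, pv_bit,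
    show ((0:Int)).toNat = 0 from by decide, show ((0:Int)+1).toNat = 1 from by decide,
    show ((0:Int)+1+1).toNat = 2 from by decide, show ((0:Int)+1+1+1).toNat = 3 from by decide,
    List.any_cons, List.any_nil, Bool.or_false, List.isEmpty_cons, List.isEmpty_nil,
    h0, h1, h2, h3]
  generalize patterns.any (fun p => PySem.Str.isIn "AUTH:" p) = a0
  generalize patterns.any (fun p => PySem.Str.isIn "SANITIZE:" p) = a1
  generalize patterns.any (fun p => PySem.Str.isIn "SQL_SECURITY:" p) = a2
  generalize patterns.any (fun p => PySem.Str.isIn "FILE_SECURITY:" p) = a3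
  generalize (PySem.Str.isIn "CSRF" vuln_type || PySem.Str.isIn "Missing Authorization" vuln_type) = c0
  generalize (PySem.Str.isIn "XSS" vuln_type || PySem.Str.isIn "Injection" vuln_type) = c1
  generalize (PySem.Str.isIn "Traversal" vuln_type || PySem.Str.isIn "File" vuln_type) = c3
  cases a0 <;> cases a1 <;> cases a2 <;> cases a3 <;> cases c0 <;> cases c1 <;> cases c3 <;> simp

-- ===== VERDICT (by name: the statement is the Claim_ definition above) =====
theorem assess_severity_py_spec : Claim_equal_assess_severity_py := by
  intro patterns vuln_type _
  unfold Spec_assess_severity_py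
  exact assess_severity_py_eq patterns vuln_type
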